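-- pv_equiv track=rewrite | github.com/omnisc13nt/MalAware | remove_comments.py | clean_whitespace
-- ===== SOURCE A (Python) =====
-- def clean_whitespace(content):
--     """Clean up excessive whitespace while preserving code structure."""
--     lines = content.split('\n')
--     cleaned_lines = []
--
--     for line in lines:
--         # Remove trailing whitespace
--         line = line.rstrip()
--         cleaned_lines.append(line)
--
--     # Remove multiple consecutive empty lines
--     result_lines = []
--     empty_count = 0
--
--     for line in cleaned_lines:
--         if line.strip() == '':
--             empty_count += 1
--             if empty_count <= 2:  # Keep at most 2 consecutive empty lines
--                 result_lines.append(line)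
--         else:
--             empty_count = 0
--             result_lines.append(line)
--
--     return '\n'.join(result_lines)
-- ===== SOURCE B (Python) =====
-- def clean_whitespace(content):
--     """Clean up excessive whitespace while preserving code structure."""
--     lines = [line.rstrip() for line in content.split('\n')]
--     result_lines = []
--     i = 0
--     n = len(lines)
--     while i < n:
--         if lines[i] == '':
--             # run of empty lines: keep at most 2 of them
--             j = i
--             while j < n and lines[j] == '':
--                 j += 1
--             result_lines.extend([''] * min(j - i, 2))
--             i = j
--         else:
--             result_lines.append(lines[i])
--             i += 1
--     return '\n'.join(result_lines)
-- ===== Notes on version B (the rewrite author's own statement) =====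
-- stated objective: alternative
-- what changed: Replaces A's per-line empty_count counter state machine with a run-based two-pointer scan that jumps over each run of blank lines at once, keeping at most two of them.
import Mathlib
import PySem

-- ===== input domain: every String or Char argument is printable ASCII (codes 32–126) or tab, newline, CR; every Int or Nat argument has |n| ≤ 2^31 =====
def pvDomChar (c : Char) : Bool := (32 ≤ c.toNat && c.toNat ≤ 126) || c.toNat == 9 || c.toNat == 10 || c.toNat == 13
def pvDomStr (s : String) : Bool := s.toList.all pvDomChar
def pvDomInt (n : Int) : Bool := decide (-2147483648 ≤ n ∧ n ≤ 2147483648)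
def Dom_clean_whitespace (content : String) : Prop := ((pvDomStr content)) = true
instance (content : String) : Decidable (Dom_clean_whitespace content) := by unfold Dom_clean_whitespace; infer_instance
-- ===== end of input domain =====

-- B collapses runs of blank lines in one run-based two-pointer scan instead of A's
-- per-line empty counter; objective: alternative decomposition (same cost).

-- ===== PORT A =====
-- A's counter loop, transliterated: state = (result_lines, empty_count)
def cwStepA (st : List (List Char) × Nat) (line : List Char) : List (List Char) × Nat :=
  if PySem.Chars.strip line = [] then
    let ec := st.2 + 1
    (if ec ≤ 2 then st.1 ++ [line] else st.1, ec)
  else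
    (st.1 ++ [line], 0)

def clean_whitespace (content : String) : String :=
  let lines := PySem.Chars.splitOn content.toList ['\n']
  let cleaned := lines.foldl (fun acc line => acc ++ [PySem.Chars.rstrip line]) []
  let result := (cleaned.foldl cwStepA ([], 0)).1
  String.ofList (PySem.Chars.join ['\n'] result)

-- ===== PORT B =====
-- B's run scan: a run of empty lines contributes at most 2 empties, then jump past it
def cwRuns : List (List Char) → List (List Char)
  | [] => []
  | l :: rest =>
    if l = [] then
      List.replicate (min (1 + (rest.takeWhile (· = [])).length) 2) [] ++
        cwRuns (rest.dropWhile (· = []))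
    else
      l :: cwRuns rest
termination_by ls => ls.length
decreasing_by
  · have := List.length_dropWhile_le (fun x => decide (x = ([] : List Char))) rest
    simp only [List.length_cons]
    omega
  · simp only [List.length_cons]
    omega

def clean_whitespace_alt (content : String) : String :=
  let lines := (PySem.Chars.splitOn content.toList ['\n']).map PySem.Chars.rstrip
  String.ofList (PySem.Chars.join ['\n'] (cwRuns lines))

-- ===== PRECONDITION & SPEC =====
def Spec_clean_whitespace (content : String) (out : String) : Prop := out = clean_whitespace_alt content
instance (content : String) (out : String) : Decidable (Spec_clean_whitespace content out) := by unfold Spec_clean_whitespace; infer_instance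

-- ===== CLAIM (what is proved, stated in full; the proofs are below) =====
def Claim_equal_clean_whitespace : Prop := ∀ (content : String), Dom_clean_whitespace content → Spec_clean_whitespace content (clean_whitespace content)

-- ===== LEMMAS AND PROOFS =====

-- pure version of A's counter loop output
def cwG : Nat → List (List Char) → List (List Char)
  | _, [] => []
  | ec, l :: ls =>
    if l = [] then (if ec + 1 ≤ 2 then [l] else []) ++ cwG (ec + 1) ls
    else l :: cwG 0 ls

lemma rstrip_eq_nil_iff (l : List Char) :
    PySem.Chars.rstrip l = [] ↔ ∀ c ∈ l, PySem.Chars.isspace c = true := by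
  simp [PySem.Chars.rstrip, List.reverse_eq_nil_iff, List.dropWhile_eq_nil_iff]

lemma strip_eq_nil_iff (l : List Char) :
    PySem.Chars.strip l = [] ↔ ∀ c ∈ l, PySem.Chars.isspace c = true := by
  simp only [PySem.Chars.strip, rstrip_eq_nil_iff, PySem.Chars.lstrip]
  constructor
  · intro h c hc
    rw [← List.takeWhile_append_dropWhile (p := PySem.Chars.isspace) (l := l)] at hc
    rcases List.mem_append.mp hc with h1 | h2
    · exact List.mem_takeWhile_imp h1
    · exact h c h2
  · intro h c hc
    exact h c ((List.dropWhile_suffix _).subset hc)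

lemma strip_rstrip_eq_nil_iff (l : List Char) :
    PySem.Chars.strip (PySem.Chars.rstrip l) = [] ↔ PySem.Chars.rstrip l = [] := by
  constructor
  · intro h
    rw [strip_eq_nil_iff] at h
    by_contra hne
    have hd : List.dropWhile PySem.Chars.isspace l.reverse ≠ [] := by
      intro h0; apply hne; simp [PySem.Chars.rstrip, h0]
    have hmem : (List.dropWhile PySem.Chars.isspace l.reverse).head hd ∈ PySem.Chars.rstrip l := by
      simp [PySem.Chars.rstrip, List.mem_reverse, List.head_mem]
    have := h _ hmem
    rw [List.head_dropWhile_not PySem.Chars.isspace hd] at this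
    exact absurd this (by simp)
  · intro h; rw [h]; rfl

-- A's fold equals cwG, for lists whose elements satisfy strip l = [] ↔ l = []
lemma foldl_cwStepA (ls : List (List Char)) :
    ∀ acc ec, (∀ l ∈ ls, (PySem.Chars.strip l = [] ↔ l = [])) →
      (ls.foldl cwStepA (acc, ec)).1 = acc ++ cwG ec ls := by
  induction ls with
  | nil => intro acc ec _; simp [cwG]
  | cons l ls ih =>
    intro acc ec h
    have hl := h l (by simp)
    have hrest : ∀ x ∈ ls, (PySem.Chars.strip x = [] ↔ x = []) := fun x hx => h x (by simp [hx])
    by_cases he : l = []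
    · subst he
      simp only [List.foldl_cons, cwStepA, hl.mpr rfl, cwG]
      by_cases h2 : ec + 1 ≤ 2 <;> simp [h2, ih _ _ hrest]
    · have hs : ¬ PySem.Chars.strip l = [] := fun hc => he (hl.mp hc)
      simp only [List.foldl_cons, cwStepA, if_neg hs, cwG, if_neg he]
      simp [ih _ _ hrest]

-- cleaned-lines loop is a map
lemma foldl_rstrip (ls : List (List Char)) :
    ∀ acc, (ls.foldl (fun acc line => acc ++ [PySem.Chars.rstrip line]) acc)
      = acc ++ ls.map PySem.Chars.rstrip := by
  induction ls with
  | nil => simp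
  | cons l ls ih => intro acc; simp [ih]

-- the counter formulation and the run formulation agree
lemma cwG_eq_cwRuns_aux : ∀ n (ls : List (List Char)), ls.length ≤ n →
    cwG 0 ls = cwRuns ls ∧ (∀ ec, 2 ≤ ec → cwG ec ls = cwRuns (ls.dropWhile (· = []))) := by
  intro n
  induction n with
  | zero =>
    intro ls h
    have : ls = [] := List.length_eq_zero_iff.mp (Nat.le_zero.mp h)
    subst this; simp [cwG, cwRuns]
  | succ n ih =>
    intro ls h
    match ls with
    | [] => simp [cwG, cwRuns]
    | l :: rest =>
      simp only [List.length_cons, Nat.add_le_add_iff_right] at h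
      constructor
      · by_cases he : l = []
        · subst he
          simp only [cwG]
          rw [cwRuns]
          
          match rest, h with
          | [], _ => simp [cwG, cwRuns]
          | r :: rest', h =>
            by_cases hr : r = []
            · subst hr
              have h2 := (ih (rest') (by simp at h; omega)).2 2 (le_refl 2)
              simp only [cwG]
              rw [h2]
              simp only [List.takeWhile_cons, List.dropWhile_cons, decide_true, if_true,
                List.length_cons]
              have hmin : min (1 + ((List.takeWhile (fun x => decide (x = ([] : List Char))) rest').length + 1)) 2 = 2 := by omega
              rw [hmin]
              rfl
            · have h0 := (ih rest' (by simp at h; omega)).1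
              have hrd : decide (r = ([] : List Char)) = false := by simpa using hr
              simp only [List.takeWhile_cons, List.dropWhile_cons, hrd, if_false,
                Bool.false_eq_true, List.length_nil]
              simp only [cwG, if_neg hr]
              rw [cwRuns, if_neg hr, h0]
              rfl
        · simp only [cwG, if_neg he]
          rw [cwRuns, if_neg he]
          rw [(ih rest h).1]
      · intro ec hec
        by_cases he : l = []
        · subst he
          simp only [cwG, if_neg (by omega : ¬ ec + 1 ≤ 2), List.nil_append]
          rw [(ih rest h).2 (ec + 1) (by omega)]
          rw [List.dropWhile_cons]
          simp
        · have hed : decide (l = ([] : List Char)) = false := by simpa using he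
          simp only [cwG, if_neg he]
          rw [List.dropWhile_cons]
          simp only [hed, Bool.false_eq_true, if_false]
          rw [cwRuns, if_neg he, (ih rest h).1]

lemma cwG_eq_cwRuns (ls : List (List Char)) : cwG 0 ls = cwRuns ls :=
  (cwG_eq_cwRuns_aux ls.length ls (le_refl _)).1

-- ===== VERDICT (by name: the statement is the Claim_ definition above) =====
theorem clean_whitespace_spec : Claim_equal_clean_whitespace := by
  intro content _
  unfold Spec_clean_whitespace clean_whitespace clean_whitespace_alt
  simp only []
  congr 1
  rw [foldl_rstrip, List.nil_append]
  rw [foldl_cwStepA _ _ _ (by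
    intro l hl
    rcases List.mem_map.mp hl with ⟨x, _, rfl⟩
    exact strip_rstrip_eq_nil_iff x)]
  rw [List.nil_append, cwG_eq_cwRuns]
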